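-- pv_equiv track=rewrite | github.com/AndreevRS/SF_HW_tic-tac-toe | tic_tac_toe.py | find_winning_cell_diagonally
-- ===== SOURCE A (Python) =====
-- def count_marks_diagonally(grid: list[list[str]], turn: str) -> list[int]:
--     """Counts the number of specified marks diagonally."""
--     diagonals = [[grid[i][i] for i in range(3)],
--                  [grid[3-1-i][i] for i in range(3-1, -1, -1)]]
--     return [sum(1 for cell in row if cell == turn) for row in diagonals]
--
-- def find_winning_cell_diagonally(grid: list[list[str]], turn: str) -> tuple[int, int] | None:
--     """Finds the cell where the winning (the third in a diagonal) mark can be placed."""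
--     own_diagonal = count_marks_diagonally(grid, turn)
--     empty_diagonal = count_marks_diagonally(grid, '-')
--     win_diagonals = [index for index, (own, empty) in enumerate(zip(own_diagonal, empty_diagonal))
--            if own == 2 and empty == 1 ]
--     if 0 in win_diagonals:  # diagonal  (0,0), (1,1), (2,2)
--         index = [grid[0][0], grid[1][1], grid[2][2]].index('-')
--         return index, index
--     elif 1 in win_diagonals:  # diagonal  (0,2), (1,1), (2,0)
--         row = [grid[0][2], grid[1][1], grid[2][0]].index('-')
--         cell = 3 - 1 - row
--         return row, cell
--     else:
--         return None
-- ===== SOURCE B (Python) =====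
-- def find_winning_cell_diagonally(grid, turn):
--     """Finds the cell where the winning (the third in a diagonal) mark can be placed."""
--     for diag in ([(0, 0), (1, 1), (2, 2)], [(0, 2), (1, 1), (2, 0)]):
--         marks = [grid[r][c] for r, c in diag]
--         if marks.count(turn) == 2 and marks.count('-') == 1:
--             return diag[marks.index('-')]
--     return None
-- ===== Notes on version B (the rewrite author's own statement) =====
-- stated objective: simpler
-- what changed: Replaces A's two full count_marks_diagonally passes plus comprehension-built win list plus separate re-index scans by one loop over the two coordinate-tuple diagonals that builds each diagonal's marks once and returns the coordinate at the marks' '-' position.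
import Mathlib
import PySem

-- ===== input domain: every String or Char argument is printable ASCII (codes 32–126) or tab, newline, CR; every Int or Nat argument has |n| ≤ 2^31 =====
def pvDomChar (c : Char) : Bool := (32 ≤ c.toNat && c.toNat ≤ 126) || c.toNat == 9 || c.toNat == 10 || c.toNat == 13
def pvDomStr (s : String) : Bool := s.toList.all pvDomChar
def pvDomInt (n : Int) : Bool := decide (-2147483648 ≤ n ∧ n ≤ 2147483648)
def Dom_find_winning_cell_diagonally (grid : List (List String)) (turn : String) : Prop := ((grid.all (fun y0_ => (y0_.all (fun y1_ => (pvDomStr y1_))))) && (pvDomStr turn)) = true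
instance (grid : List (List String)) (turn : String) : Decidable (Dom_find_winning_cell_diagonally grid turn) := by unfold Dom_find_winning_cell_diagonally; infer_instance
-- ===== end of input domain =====

-- B fuses A's two count_marks_diagonally passes, the win-list comprehension and the separate
-- re-index scans into one loop over coordinate-tuple diagonals (objective: simpler).


-- ===== PORT A =====
-- grid[r][c]; total stand-in for Python's indexing, exact whenever r, c are in range
-- (Pre_ guarantees that for every access both ports make)
def pvCell (grid : List (List String)) (r c : Int) : String :=
  PySem.List.pyGetD (PySem.List.pyGetD grid r []) c ""

def count_marks_diagonally (grid : List (List String)) (turn : String) : List Int :=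
  let diagonals : List (List String) :=
    [ (PySem.List.pyRange 0 3 1).map (fun i => pvCell grid i i),
      (PySem.List.pyRange (3-1) (-1) (-1)).map (fun i => pvCell grid (3-1-i) i) ]
  diagonals.map (fun row => ((row.map (fun cell => if cell = turn then (1:Int) else 0)).sum))

def find_winning_cell_diagonally (grid : List (List String)) (turn : String) : Option (Int × Int) :=
  let own_diagonal := count_marks_diagonally grid turn
  let empty_diagonal := count_marks_diagonally grid "-"
  let win_diagonals : List Int :=
    (PySem.List.enumerate (own_diagonal.zip empty_diagonal)).filterMap
      (fun p => if p.2.1 = 2 ∧ p.2.2 = 1 then some p.1 else none)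
  if (0:Int) ∈ win_diagonals then
    -- .index('-') cannot raise here: this diagonal's '-'-count is 1
    let index : Int := ((PySem.List.index? [pvCell grid 0 0, pvCell grid 1 1, pvCell grid 2 2] "-").getD 0 : Nat)
    some (index, index)
  else if (1:Int) ∈ win_diagonals then
    let row : Int := ((PySem.List.index? [pvCell grid 0 2, pvCell grid 1 1, pvCell grid 2 0] "-").getD 0 : Nat)
    some (row, 3 - 1 - row)
  else
    none

-- ===== PORT B =====
-- B's loop 'for diag in (main, anti)': build the marks once, test the two counts,
-- return diag[marks.index('-')] (the index exists: the '-'-count is 1)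
def pvDiagLoop (grid : List (List String)) (turn : String) : List (List (Int × Int)) → Option (Int × Int)
  | [] => none
  | diag :: rest =>
    let marks := diag.map (fun rc => pvCell grid rc.1 rc.2)
    if PySem.List.count marks turn = 2 ∧ PySem.List.count marks "-" = 1 then
      some (diag.getD ((PySem.List.index? marks "-").getD 0) (0, 0))
    else pvDiagLoop grid turn rest

def find_winning_cell_diagonally_alt (grid : List (List String)) (turn : String) : Option (Int × Int) :=
  pvDiagLoop grid turn [[(0, 0), (1, 1), (2, 2)], [(0, 2), (1, 1), (2, 0)]]

-- ===== PRECONDITION & SPEC =====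
-- exactly the grids on which A's index accesses all succeed: ≥3 rows, and the accessed
-- cells exist (row 0: cols 0 and 2; row 1: col 1; row 2: cols 0 and 2)
def Pre_find_winning_cell_diagonally (grid : List (List String)) (turn : String) : Prop :=
  3 ≤ grid.length ∧ 3 ≤ (grid.getD 0 []).length ∧ 2 ≤ (grid.getD 1 []).length ∧ 3 ≤ (grid.getD 2 []).length
instance (grid : List (List String)) (turn : String) : Decidable (Pre_find_winning_cell_diagonally grid turn) := by unfold Pre_find_winning_cell_diagonally; infer_instance

def pvWitness_find_winning_cell_diagonally : List (List String) × String :=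
  ([["x", "-", "o"], ["o", "x", "-"], ["-", "o", "x"]], "x")

def Spec_find_winning_cell_diagonally (grid : List (List String)) (turn : String) (out : Option (Int × Int)) : Prop := out = find_winning_cell_diagonally_alt grid turn
instance (grid : List (List String)) (turn : String) (out : Option (Int × Int)) : Decidable (Spec_find_winning_cell_diagonally grid turn out) := by unfold Spec_find_winning_cell_diagonally; infer_instance

-- ===== CLAIM (what is proved, stated in full; the proofs are below) =====
def Claim_equal_find_winning_cell_diagonally : Prop := ∀ (grid : List (List String)) (turn : String), Dom_find_winning_cell_diagonally grid turn → Pre_find_winning_cell_diagonally grid turn → Spec_find_winning_cell_diagonally grid turn (find_winning_cell_diagonally grid turn)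

-- ===== LEMMAS AND PROOFS =====
-- A's Int-sum pair (own = 2, empty = 1) over a diagonal [x,y,z] ↔ B's Nat-count pair
theorem pv_cond_iff (x y z t : String) :
    ((if x = t then (1:Int) else 0) + ((if y = t then 1 else 0) + if z = t then 1 else 0) = 2 ∧
     (if x = "-" then (1:Int) else 0) + ((if y = "-" then 1 else 0) + if z = "-" then 1 else 0) = 1)
  ↔ ((((if z = t then (1:Nat) else 0) + if y = t then 1 else 0) + if x = t then 1 else 0) = 2 ∧
     (((if z = "-" then (1:Nat) else 0) + if y = "-" then 1 else 0) + if x = "-" then 1 else 0) = 1) := by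
  split_ifs <;> omega

set_option maxHeartbeats 2000000 in
theorem pv_eq_destructured (a b c d e f g h : String) (t0 t1 t2 : List String)
    (rest : List (List String)) (turn : String) :
    find_winning_cell_diagonally ((a::b::c::t0)::(d::e::t1)::(f::g::h::t2)::rest) turn
      = find_winning_cell_diagonally_alt ((a::b::c::t0)::(d::e::t1)::(f::g::h::t2)::rest) turn := by
  have h1 : PySem.List.pyRange 0 3 1 = [0,1,2] := by decide
  have h2 : PySem.List.pyRange (3-1) (-1) (-1) = [2,1,0] := by decide
  simp only [find_winning_cell_diagonally, find_winning_cell_diagonally_alt,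
    count_marks_diagonally, pvDiagLoop, h1, h2, List.map_cons, List.map_nil]
  simp [pvCell, PySem.List.pyGetD_ofNat', PySem.List.enumerate, PySem.List.count,
    PySem.List.index?_eq_idxOf?, List.idxOf?, List.count_cons, List.findIdx?]
  by_cases hC0 : ((((if h = turn then (1:Nat) else 0) + if e = turn then 1 else 0) + if a = turn then 1 else 0) = 2 ∧
      (((if h = "-" then (1:Nat) else 0) + if e = "-" then 1 else 0) + if a = "-" then 1 else 0) = 1)
  · rw [if_pos ((pv_cond_iff a e h turn).mpr hC0), if_pos hC0]
    obtain ⟨-, hc⟩ := hC0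
    by_cases q1 : a = "-" <;> by_cases q2 : e = "-" <;> by_cases q3 : h = "-" <;>
      simp_all [List.findIdx?.go]
  · rw [if_neg (fun hh => hC0 ((pv_cond_iff a e h turn).mp hh)), if_neg hC0]
    by_cases hC1 : ((((if f = turn then (1:Nat) else 0) + if e = turn then 1 else 0) + if c = turn then 1 else 0) = 2 ∧
        (((if f = "-" then (1:Nat) else 0) + if e = "-" then 1 else 0) + if c = "-" then 1 else 0) = 1)
    · rw [if_pos ((pv_cond_iff c e f turn).mpr hC1), if_pos hC1]
      obtain ⟨-, hc⟩ := hC1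
      by_cases q1 : c = "-" <;> by_cases q2 : e = "-" <;> by_cases q3 : f = "-" <;>
        simp_all [List.findIdx?.go]
    · rw [if_neg (fun hh => hC1 ((pv_cond_iff c e f turn).mp hh)), if_neg hC1]

-- ===== VERDICT (by name: the statement is the Claim_ definition above) =====
theorem find_winning_cell_diagonally_spec : Claim_equal_find_winning_cell_diagonally := by
  intro grid turn _ pre
  unfold Pre_find_winning_cell_diagonally at pre
  rcases grid with _ | ⟨r0, _ | ⟨r1, _ | ⟨r2, rest⟩⟩⟩ <;> simp at pre
  rcases r0 with _ | ⟨a, _ | ⟨b, _ | ⟨c, t0⟩⟩⟩ <;> simp at pre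
  rcases r1 with _ | ⟨d, _ | ⟨e, t1⟩⟩ <;> simp at pre
  rcases r2 with _ | ⟨f, _ | ⟨g, _ | ⟨h, t2⟩⟩⟩ <;> simp at pre
  exact pv_eq_destructured a b c d e f g h t0 t1 t2 rest turn
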